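-- pv_equiv track=rewrite | github.com/vhsw/Advent-of-Code | 2016/Day 14/one_time_pad.py | three_in_row
-- ===== SOURCE A (Python) =====
-- def three_in_row(digest: str):
--     prev = ""
--     counter = 0
--     for char in digest:
--         if char != prev:
--             counter = 1
--             prev = char
--             continue
--         counter += 1
--         if counter >= 3:
--             return char
-- ===== SOURCE B (Python) =====
-- def three_in_row(digest: str):
--     for a, b, c in zip(digest, digest[1:], digest[2:]):
--         if a == b == c:
--             return a
-- ===== Notes on version B (the rewrite author's own statement) =====
-- stated objective: simpler
-- what changed: Replaces the stateful prev/counter run-length scan with a stateless sliding window over overlapping triples (zip of the string with its two shifts), returning the first character whose triple is constant.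
import Mathlib
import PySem

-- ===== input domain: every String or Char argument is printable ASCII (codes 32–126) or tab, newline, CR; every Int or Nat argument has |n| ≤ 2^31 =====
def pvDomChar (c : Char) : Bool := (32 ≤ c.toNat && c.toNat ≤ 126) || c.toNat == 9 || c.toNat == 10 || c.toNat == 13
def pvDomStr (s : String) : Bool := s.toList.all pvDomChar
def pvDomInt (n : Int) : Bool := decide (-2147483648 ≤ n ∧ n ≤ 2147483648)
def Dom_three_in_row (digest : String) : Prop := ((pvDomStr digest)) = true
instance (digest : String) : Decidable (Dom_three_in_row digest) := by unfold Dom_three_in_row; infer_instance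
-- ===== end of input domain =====

-- ===== PORT A =====
-- A: stateful scan keeping the previous character (as a 1-char string) and a run counter.
def three_in_row_goA : List Char → String → Nat → Option String
  | [], _, _ => none
  | ch :: rest, prev, counter =>
    if String.ofList [ch] ≠ prev then
      three_in_row_goA rest (String.ofList [ch]) 1
    else if counter + 1 ≥ 3 then
      some (String.ofList [ch])
    else
      three_in_row_goA rest prev (counter + 1)

def three_in_row (digest : String) : Option String :=
  three_in_row_goA digest.toList "" 0

-- ===== PORT B =====
-- B: sliding window over overlapping triples (zip of the string with its two shifts).
def three_in_row_goB : List Char → Option String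
  | a :: b :: c :: rest =>
    if a = b ∧ b = c then some (String.ofList [a]) else three_in_row_goB (b :: c :: rest)
  | _ => none

def three_in_row_alt (digest : String) : Option String :=
  three_in_row_goB digest.toList

-- ===== PRECONDITION & SPEC =====
def Spec_three_in_row (digest : String) (out : Option String) : Prop := out = three_in_row_alt digest
instance (digest : String) (out : Option String) : Decidable (Spec_three_in_row digest out) := by unfold Spec_three_in_row; infer_instance

-- ===== CLAIM (what is proved, stated in full; the proofs are below) =====
def Claim_equal_three_in_row : Prop := ∀ (digest : String), Dom_three_in_row digest → Spec_three_in_row digest (three_in_row digest)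

-- ===== LEMMAS AND PROOFS =====

theorem goB_cons_ne (a b : Char) (r : List Char) (h : a ≠ b) :
    three_in_row_goB (a :: b :: r) = three_in_row_goB (b :: r) := by
  cases r with
  | nil => simp [three_in_row_goB]
  | cons e r' => simp [three_in_row_goB, h]

theorem mk_single_inj (a b : Char) : (String.ofList [a] = String.ofList [b]) ↔ a = b := by
  constructor
  · intro h
    have := congrArg String.toList h
    simpa using this
  · intro h; rw [h]

theorem goA_inv (l : List Char) :
    (∀ c : Char, three_in_row_goA l (String.ofList [c]) 1 = three_in_row_goB (c :: l)) ∧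
    (∀ c : Char, three_in_row_goA l (String.ofList [c]) 2 =
      match l with
      | [] => none
      | e :: r => if e = c then some (String.ofList [c]) else three_in_row_goB (e :: r)) := by
  induction l with
  | nil =>
    constructor <;> intro c <;> simp [three_in_row_goA, three_in_row_goB]
  | cons d r ih =>
    constructor
    · intro c
      by_cases hdc : d = c
      · subst hdc
        have h2 := ih.2 d
        simp [three_in_row_goA] at h2 ⊢
        rw [h2]
        cases r with
        | nil => simp [three_in_row_goB]
        | cons e r' =>
          by_cases hed : e = d
          · subst hed
            simp [three_in_row_goB]
          · have hde : d ≠ e := fun h => hed h.symm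
            simp [three_in_row_goB, hde, goB_cons_ne d e r' hde, hed]
      · have hne : String.ofList [d] ≠ String.ofList [c] := by
          simp [mk_single_inj]; exact hdc
        have h1 := ih.1 d
        have hdc' : d ≠ c := hdc
        simp [three_in_row_goA, hne, h1]
        cases r with
        | nil => simp [three_in_row_goB]
        | cons e r' =>
          have : ¬ (c = d ∧ d = e) := by
            intro h; exact hdc (h.1.symm)
          simp [three_in_row_goB, this]
    · intro c
      by_cases hdc : d = c
      · subst hdc
        simp [three_in_row_goA]
      · have hne : String.ofList [d] ≠ String.ofList [c] := by
          simp [mk_single_inj]; exact hdc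
        have h1 := ih.1 d
        simp [three_in_row_goA, hne, h1, hdc]

-- ===== VERDICT (by name: the statement is the Claim_ definition above) =====
theorem three_in_row_spec : Claim_equal_three_in_row := by
  intro digest _
  unfold Spec_three_in_row three_in_row three_in_row_alt
  cases h : digest.toList with
  | nil => simp [three_in_row_goA, three_in_row_goB]
  | cons c rest =>
    have hne : String.ofList [c] ≠ "" := by
      intro h'
      have := congrArg String.toList h'
      simp at this
    simp [three_in_row_goA, hne]
    exact (goA_inv rest).1 c
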